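-- pv_equiv track=rewrite | github.com/lichkingwulaa/Codewars | 4 kyu/4_kyu_The_fusc_function_Part_2.py | F
-- ===== SOURCE A (Python) =====
-- def F(n, a, b):
--     while n >= 2:
--         if (n % 2) == 0:
--             a, b = a+b, b
--         else:
--             a, b = a, a+b
--         n //= 2
--
--     if n == 0:
--         return b
--     else:
--         return a+b
-- ===== SOURCE B (Python) =====
-- def F(n, a, b):
--     if n == 0:
--         return b
--     if n < 2:          # n == 1 or negative: no bits to process
--         return a + b
--     # Scan n's lower bits MSB-first (opposite order to a sequential update),
--     # accumulating the 2x2 matrix product of the per-bit transforms, and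
--     # apply it to (a, b) once at the end.
--     p, q, r, s = 1, 0, 0, 1
--     for i in range(n.bit_length() - 2, -1, -1):
--         if (n >> i) & 1:
--             p, r = p + q, r + s      # right-multiply by [[1,0],[1,1]]
--         else:
--             q, s = p + q, r + s      # right-multiply by [[1,1],[0,1]]
--     return (p + r) * a + (q + s) * b
-- ===== Notes on version B (the rewrite author's own statement) =====
-- stated objective: alternative
-- what changed: B replaces A's LSB-first sequential pair updates with an MSB-first pass over n's binary digits (via bit_length) that accumulates a 2x2 linear transform and applies it to (a,b) once at the end.
import Mathlib
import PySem

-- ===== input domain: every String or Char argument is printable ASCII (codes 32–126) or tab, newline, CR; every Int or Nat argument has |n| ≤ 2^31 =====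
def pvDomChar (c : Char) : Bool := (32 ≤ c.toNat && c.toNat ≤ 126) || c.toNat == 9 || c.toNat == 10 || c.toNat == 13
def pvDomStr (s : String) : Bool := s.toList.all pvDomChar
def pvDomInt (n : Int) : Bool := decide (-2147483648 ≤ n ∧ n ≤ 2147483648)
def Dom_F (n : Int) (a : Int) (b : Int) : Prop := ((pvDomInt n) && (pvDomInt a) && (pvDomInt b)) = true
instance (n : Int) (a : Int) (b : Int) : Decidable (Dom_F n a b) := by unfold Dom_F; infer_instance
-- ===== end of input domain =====

-- B re-implements A's LSB-first pair iteration as an MSB-first pass over n's binary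
-- digits that accumulates a 2x2 linear transform, applied once to (a,b) at the end
-- (objective: alternative; same asymptotic cost).

-- ===== PORT A =====
def F (n : Int) (a : Int) (b : Int) : Int :=
  if _h : 2 ≤ n then
    if PySem.Int.mod n 2 = 0 then F (PySem.Int.floordiv n 2) (a + b) b
    else F (PySem.Int.floordiv n 2) a (a + b)
  else if n = 0 then b else a + b
termination_by n.toNat
decreasing_by
  all_goals rw [PySem.Int.floordiv_eq_ediv_of_pos (by omega)]; omega

-- ===== PORT B =====
-- (n >> i) & 1 with i ≥ 0 (true for every i the range yields) is n >>> i.toNat & 1.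
def F_alt (n : Int) (a : Int) (b : Int) : Int :=
  if n = 0 then b
  else if n < 2 then a + b
  else
    let st := (PySem.List.pyRange ((PySem.Int.bitLength n : Int) - 2) (-1) (-1)).foldl
      (fun (st : Int × Int × Int × Int) (i : Int) =>
        if PySem.Int.band (n >>> i.toNat) 1 = 1 then
          (st.1 + st.2.1, st.2.1, st.2.2.1 + st.2.2.2, st.2.2.2)
        else
          (st.1, st.1 + st.2.1, st.2.2.1, st.2.2.1 + st.2.2.2))
      (1, 0, 0, 1)
    (st.1 + st.2.2.1) * a + (st.2.1 + st.2.2.2) * b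

-- ===== PRECONDITION & SPEC =====
def Spec_F (n : Int) (a : Int) (b : Int) (out : Int) : Prop := out = F_alt n a b
instance (n : Int) (a : Int) (b : Int) (out : Int) : Decidable (Spec_F n a b out) := by unfold Spec_F; infer_instance

-- ===== CLAIM (what is proved, stated in full; the proofs are below) =====
def Claim_equal_F : Prop := ∀ (n : Int) (a : Int) (b : Int), Dom_F n a b → Spec_F n a b (F n a b)

-- ===== LEMMAS AND PROOFS =====

-- B's per-bit matrix step, and the whole accumulated transform for a given n.
def pvStep (n : Int) (st : Int × Int × Int × Int) (i : Int) : Int × Int × Int × Int :=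
  if PySem.Int.band (n >>> i.toNat) 1 = 1 then
    (st.1 + st.2.1, st.2.1, st.2.2.1 + st.2.2.2, st.2.2.2)
  else
    (st.1, st.1 + st.2.1, st.2.2.1, st.2.2.1 + st.2.2.2)

def pvG (n : Int) : Int × Int × Int × Int :=
  (PySem.List.pyRange ((PySem.Int.bitLength n : Int) - 2) (-1) (-1)).foldl (pvStep n) (1, 0, 0, 1)

def pvApp (st : Int × Int × Int × Int) (a b : Int) : Int :=
  (st.1 + st.2.2.1) * a + (st.2.1 + st.2.2.2) * b

theorem pvFalt_eq (n a b : Int) (h : 2 ≤ n) : F_alt n a b = pvApp (pvG n) a b := by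
  simp only [F_alt, if_neg (show ¬ n = 0 by omega), if_neg (show ¬ n < 2 by omega)]
  rfl

theorem pvRange_split (k : Int) (hk : 0 ≤ k) :
    PySem.List.pyRange k (-1) (-1) = PySem.List.pyRange k 0 (-1) ++ [0] := by
  rw [PySem.List.pyRange_neg_one, PySem.List.pyRange_neg_one]
  have hk1 : (k - -1).toNat = (k - 0).toNat + 1 := by omega
  rw [hk1, List.range_succ, List.map_append]
  congr 1
  simp
  omega

theorem pvRange_shift (k : Int) (hk : 0 ≤ k) :
    PySem.List.pyRange k 0 (-1) = (PySem.List.pyRange (k - 1) (-1) (-1)).map (· + 1) := by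
  rw [PySem.List.pyRange_neg_one, PySem.List.pyRange_neg_one, List.map_map]
  have : (k - 0).toNat = (k - 1 - -1).toNat := by omega
  rw [this]
  apply List.map_congr_left
  intro x _
  simp
  omega

theorem pvStep_shift (n : Int) (_hn : 2 ≤ n) (st : Int × Int × Int × Int) (i : Int) (hi : 0 ≤ i) :
    pvStep n st (i + 1) = pvStep (PySem.Int.floordiv n 2) st i := by
  have h1 : (i + 1).toNat = 1 + i.toNat := by omega
  have hs : n >>> (1:Nat) = n / 2 := by rw [Int.shiftRight_eq_div_pow]; norm_num
  have h2 : n >>> (i + 1).toNat = (PySem.Int.floordiv n 2) >>> i.toNat := by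
    rw [h1, Int.shiftRight_add, hs, PySem.Int.floordiv_eq_ediv_of_pos (by norm_num)]
  simp [pvStep, h2]

theorem pvBitLength_two (n : Int) (hn : 2 ≤ n) :
    (PySem.Int.bitLength n : Int) - 2 - 1 = (PySem.Int.bitLength (PySem.Int.floordiv n 2) : Int) - 2 := by
  have := PySem.Int.bitLength_of_pos (n := n) (by omega)
  omega

theorem pvG_rec (n : Int) (hn : 2 ≤ n) :
    pvG n = pvStep n (pvG (PySem.Int.floordiv n 2)) 0 := by
  have hbl : 2 ≤ PySem.Int.bitLength n := by
    by_contra h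
    have h2 := PySem.Int.lt_two_pow_bitLength n
    have h3 : (2:Nat) ^ PySem.Int.bitLength n ≤ 2 ^ 1 :=
      Nat.pow_le_pow_right (by norm_num) (by omega)
    simp at h3
    omega
  have hk : (0:Int) ≤ (PySem.Int.bitLength n : Int) - 2 := by omega
  unfold pvG
  rw [pvRange_split _ hk, List.foldl_append, pvRange_shift _ hk, List.foldl_map,
    pvBitLength_two n hn]
  have hfold :
      (PySem.List.pyRange ((PySem.Int.bitLength (PySem.Int.floordiv n 2) : Int) - 2) (-1) (-1)).foldl
        (fun st i => pvStep n st (i + 1)) (1, 0, 0, 1) =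
      (PySem.List.pyRange ((PySem.Int.bitLength (PySem.Int.floordiv n 2) : Int) - 2) (-1) (-1)).foldl
        (pvStep (PySem.Int.floordiv n 2)) (1, 0, 0, 1) := by
    apply PySem.List.foldl_congr_mem
    intro st i hi
    have : 0 ≤ i := by
      have := (PySem.List.mem_pyRange_neg_one.mp hi).1
      omega
    exact pvStep_shift n hn st i this
  rw [hfold]
  simp [List.foldl]

theorem pvApp_step0 (n : Int) (_hn : 2 ≤ n) (st : Int × Int × Int × Int) (a b : Int) :
    pvApp (pvStep n st 0) a b =
      if PySem.Int.mod n 2 = 0 then pvApp st (a + b) b else pvApp st a (a + b) := by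
  have hb : PySem.Int.band (n >>> (0:Int).toNat) 1 = PySem.Int.mod n 2 := by
    rw [show (0:Int).toNat = 0 from rfl]
    simpa using PySem.Int.band_one n
  rcases PySem.Int.mod_two_eq n with hm | hm
  · rw [if_pos hm]
    simp only [pvStep, hb, hm, pvApp]
    norm_num
    ring
  · rw [if_neg (by omega)]
    simp only [pvStep, hb, hm, pvApp]
    norm_num
    ring

theorem pvMain (N : Nat) : ∀ (n a b : Int), n.toNat ≤ N → 1 ≤ n → F n a b = pvApp (pvG n) a b := by
  induction N with
  | zero => intro n a b hle h1; omega
  | succ N ih =>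
    intro n a b hle h1
    by_cases h2 : 2 ≤ n
    · have hdiv : PySem.Int.floordiv n 2 = n / 2 :=
        PySem.Int.floordiv_eq_ediv_of_pos (by norm_num)
      have hle' : (PySem.Int.floordiv n 2).toNat ≤ N := by rw [hdiv]; omega
      have h1' : 1 ≤ PySem.Int.floordiv n 2 := by rw [hdiv]; omega
      rw [F, dif_pos h2, pvG_rec n h2]
      rcases PySem.Int.mod_two_eq n with hm | hm
      · rw [if_pos hm, pvApp_step0 n h2, if_pos hm]
        exact ih _ _ _ hle' h1'
      · rw [if_neg (by omega), pvApp_step0 n h2, if_neg (by omega)]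
        exact ih _ _ _ hle' h1'
    · have hn1 : n = 1 := by omega
      subst hn1
      have hg : pvG 1 = (1, 0, 0, 1) := by decide
      rw [F]
      simp [pvApp, hg]

-- ===== VERDICT (by name: the statement is the Claim_ definition above) =====
theorem F_spec : Claim_equal_F := by
  intro n a b _
  unfold Spec_F
  by_cases h2 : 2 ≤ n
  · rw [pvFalt_eq n a b h2]
    exact pvMain n.toNat n a b le_rfl (by omega)
  · by_cases h0 : n = 0
    · subst h0; simp [F, F_alt]
    · rw [F, F_alt]
      simp [show ¬ 2 ≤ n from h2, h0, show n < 2 by omega]
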